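-- pv_equiv track=rewrite | github.com/ElizavetaBA-wed/python_dz | 5.py | f
-- ===== SOURCE A (Python) =====
-- def y(n_1):
--   s=bin(n_1)[2:]
--   s1=s[:(len(s))//2]
--   s2=s[(len(s)-1)//2+1:]
--   return s1[::-1]==s2
--
-- def f(n_1):
--   v=n_1
--   d=2
--   if n_1==1:
--     return False
--   else:
--     while d<=n_1//2:
--       if n_1%d==0:
--         v=0
--       d+=1
--     if v==0:
--       return False
--     else:
--       return y(v)
-- ===== SOURCE B (Python) =====
-- def y(n_1):
--   s=bin(n_1)[2:]
--   s1=s[:(len(s))//2]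
--   s2=s[(len(s)-1)//2+1:]
--   return s1[::-1]==s2
--
-- def f(n_1):
--   if n_1 < 2:
--     return False
--   d = 2
--   while d * d <= n_1:
--     if n_1 % d == 0:
--       return False
--     d += 1
--   return y(n_1)
-- ===== Notes on version B (the rewrite author's own statement) =====
-- stated objective: faster
-- what changed: Replaced A's trial division up to n//2 (flag variable, no early exit) by sqrt-bounded trial division with early return behind a small-argument guard; the palindrome helper y is kept verbatim.
import Mathlib
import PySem

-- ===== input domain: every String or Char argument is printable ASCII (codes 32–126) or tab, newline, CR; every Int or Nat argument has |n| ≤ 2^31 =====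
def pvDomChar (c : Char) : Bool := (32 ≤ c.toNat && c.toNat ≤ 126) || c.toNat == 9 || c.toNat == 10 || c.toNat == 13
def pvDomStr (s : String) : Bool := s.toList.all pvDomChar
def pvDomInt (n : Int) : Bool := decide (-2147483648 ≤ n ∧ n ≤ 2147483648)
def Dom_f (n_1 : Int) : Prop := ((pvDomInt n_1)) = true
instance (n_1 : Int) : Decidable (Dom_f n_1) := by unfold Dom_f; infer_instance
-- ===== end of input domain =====

-- B replaces A's flag-based trial division up to n//2 by sqrt-bounded trial division
-- with early return behind a small-argument guard (objective: faster); helper y is shared verbatim.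
-- Loops are transcribed with an explicit trip-count fuel (exact bound, same tests in the same order).

-- ===== PORT A =====
-- bin(m) digits for m : Nat, MSB first ([] for 0); models Python's bin builtin
-- (fuel-based structural recursion; fuel m dominates the m → m/2 chain)
def natBitsAux : Nat → Nat → List Char
  | 0, _ => []
  | fuel + 1, m => if m = 0 then [] else natBitsAux fuel (m / 2) ++ [if m % 2 = 1 then '1' else '0']

def natBits (m : Nat) : List Char := natBitsAux m m

-- bin(n)[2:] as a character list ('-0b…'[2:] = 'b' + digits for negative n)
def binTail (n : Int) : List Char :=
  if n < 0 then 'b' :: natBits (-n).toNat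
  else if n = 0 then ['0'] else natBits n.toNat

-- helper y, shared verbatim by both Python versions
def y (n_1 : Int) : Bool :=
  let s := binTail n_1
  let s1 := s.take (s.length / 2)
  let s2 := s.drop ((s.length - 1) / 2 + 1)
  s1.reverse == s2

-- A's while-loop (guard d ≤ n//2 retested each round; fuel is the exact trip count)
def fLoopAAux (n : Int) : Nat → Int → Int → Int
  | 0, _, v => v
  | fuel + 1, d, v =>
    if d ≤ PySem.Int.floordiv n 2 then
      fLoopAAux n fuel (d + 1) (if PySem.Int.mod n d = 0 then 0 else v)
    else v

def fLoopA (n d v : Int) : Int := fLoopAAux n (PySem.Int.floordiv n 2 + 1 - d).toNat d v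

def f (n_1 : Int) : Bool :=
  if n_1 = 1 then false
  else
    let v := fLoopA n_1 2 n_1
    if v = 0 then false else y v

-- ===== PORT B =====
-- B's while-loop (guard d*d ≤ n retested each round; fuel n+1-d dominates the trip count)
def fLoopBAux (n : Int) : Nat → Int → Bool
  | 0, _ => y n
  | fuel + 1, d =>
    if d * d ≤ n then
      if PySem.Int.mod n d = 0 then false else fLoopBAux n fuel (d + 1)
    else y n

def fLoopB (n d : Int) : Bool := fLoopBAux n (n + 1 - d).toNat d

def f_alt (n_1 : Int) : Bool :=
  if n_1 < 2 then false else fLoopB n_1 2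

-- ===== PRECONDITION & SPEC =====
def Spec_f (n_1 : Int) (out : Bool) : Prop := out = f_alt n_1
instance (n_1 : Int) (out : Bool) : Decidable (Spec_f n_1 out) := by unfold Spec_f; infer_instance

-- ===== CLAIM (what is proved, stated in full; the proofs are below) =====
def Claim_equal_f : Prop := ∀ (n_1 : Int), Dom_f n_1 → Spec_f n_1 (f n_1)

-- ===== LEMMAS AND PROOFS =====

-- digits produced by natBitsAux are bits
lemma natBitsAux_mem : ∀ (fuel m : Nat) {c : Char}, c ∈ natBitsAux fuel m → c = '0' ∨ c = '1' := by
  intro fuel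
  induction fuel with
  | zero => intro m c h; simp [natBitsAux] at h
  | succ k ih =>
    intro m c h
    rw [natBitsAux] at h
    split at h
    · simp at h
    · rcases List.mem_append.1 h with h' | h'
      · exact ih (m / 2) h'
      · simp at h'; subst h'; split <;> simp

lemma natBits_mem {m : Nat} {c : Char} (h : c ∈ natBits m) : c = '0' ∨ c = '1' :=
  natBitsAux_mem m m h

lemma natBits_ne_nil {m : Nat} (h : m ≠ 0) : natBits m ≠ [] := by
  rw [natBits]
  cases m with
  | zero => exact absurd rfl h
  | succ k => rw [natBitsAux]; simp

-- dropping fewer elements than the length keeps the last element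
lemma drop_getLast? : ∀ (l : List Char) (i : Nat), i < l.length → (l.drop i).getLast? = l.getLast? := by
  intro l
  induction l with
  | nil => intro i h; simp at h
  | cons x xs ih =>
    intro i h
    cases i with
    | zero => simp
    | succ j =>
      simp only [List.drop_succ_cons]
      rw [ih j (by simpa using h)]
      cases xs with
      | nil => simp at h
      | cons b t => simp [List.getLast?_cons_cons]

lemma mem_of_getLast? : ∀ {l : List Char} {c : Char}, l.getLast? = some c → c ∈ l := by
  intro l
  induction l with
  | nil => intro c h; simp at h
  | cons x xs ih =>
    intro c h
    cases xs with
    | nil => simp at h; simp [h]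
    | cons b t =>
      rw [List.getLast?_cons_cons] at h
      exact List.mem_cons_of_mem _ (ih h)

-- y is false on every negative input: bin(n)[2:] starts with 'b' but ends with a bit
lemma y_neg {n : Int} (hn : n < 0) : y n = false := by
  simp only [y]
  set s := binTail n with hs
  have hst : s = 'b' :: natBits (-n).toNat := by rw [hs, binTail, if_pos hn]
  have htne : natBits (-n).toNat ≠ [] := natBits_ne_nil (by omega)
  have hL : 2 ≤ s.length := by
    rw [hst]
    simp only [List.length_cons]
    have h0 : 0 < (natBits (-n).toNat).length := List.length_pos_of_ne_nil htne
    omega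
  rw [beq_eq_false_iff_ne]
  intro heq
  have hlast := congrArg List.getLast? heq
  have h1 : (s.take (s.length / 2)).reverse.getLast? = some 'b' := by
    rw [List.getLast?_reverse]
    rcases Nat.exists_eq_add_of_le (show 1 ≤ s.length / 2 by omega) with ⟨j, hj⟩
    rw [hj, hst, Nat.add_comm, List.take_succ_cons, List.head?_cons]
  have h2 : (s.drop ((s.length - 1) / 2 + 1)).getLast? = s.getLast? :=
    drop_getLast? s _ (by omega)
  rw [h1, h2] at hlast
  cases ht : natBits (-n).toNat with
  | nil => exact absurd ht htne
  | cons a t =>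
    rw [hst, ht, List.getLast?_cons_cons] at hlast
    have hmem : 'b' ∈ natBits (-n).toNat := by rw [ht]; exact mem_of_getLast? hlast.symm
    rcases natBits_mem hmem with hc | hc <;> simp_all

-- once v is 0 A's loop returns 0
lemma fLoopAAux_zero (n : Int) : ∀ (fuel : Nat) (d : Int), fLoopAAux n fuel d 0 = 0 := by
  intro fuel
  induction fuel with
  | zero => intro d; rfl
  | succ k ih =>
    intro d
    rw [fLoopAAux]
    split
    · split <;> exact ih (d + 1)
    · rfl

-- characterization of A's loop, for any adequate fuel
lemma fLoopAAux_of_exists (n : Int) : ∀ (fuel : Nat) (d v : Int),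
    (PySem.Int.floordiv n 2 + 1 - d).toNat ≤ fuel →
    (∃ k : Int, d ≤ k ∧ k ≤ PySem.Int.floordiv n 2 ∧ PySem.Int.mod n k = 0) →
    fLoopAAux n fuel d v = 0 := by
  intro fuel
  induction fuel with
  | zero =>
    intro d v hfuel h
    obtain ⟨k, hk1, hk2, -⟩ := h
    omega
  | succ m ih =>
    intro d v hfuel h
    obtain ⟨k, hk1, hk2, hk3⟩ := h
    rw [fLoopAAux, if_pos (by omega : d ≤ PySem.Int.floordiv n 2)]
    by_cases hd : PySem.Int.mod n d = 0
    · rw [if_pos hd]; exact fLoopAAux_zero n m (d + 1)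
    · rw [if_neg hd]
      have hkd : k ≠ d := fun he => hd (he ▸ hk3)
      exact ih (d + 1) _ (by omega) ⟨k, by omega, hk2, hk3⟩

lemma fLoopAAux_of_not_exists (n : Int) : ∀ (fuel : Nat) (d v : Int),
    (¬ ∃ k : Int, d ≤ k ∧ k ≤ PySem.Int.floordiv n 2 ∧ PySem.Int.mod n k = 0) →
    fLoopAAux n fuel d v = v := by
  intro fuel
  induction fuel with
  | zero => intro d v _; rfl
  | succ m ih =>
    intro d v h
    rw [fLoopAAux]
    split
    · rename_i hguard
      rw [if_neg (fun hc => h ⟨d, le_refl d, hguard, hc⟩)]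
      exact ih (d + 1) v (fun ⟨k, hk1, hk2, hk3⟩ => h ⟨k, by omega, hk2, hk3⟩)
    · rfl

-- characterization of B's loop, for any adequate fuel and d ≥ 2
lemma fLoopBAux_of_exists (n : Int) : ∀ (fuel : Nat) (d : Int), 2 ≤ d →
    (n + 1 - d).toNat ≤ fuel →
    (∃ k : Int, d ≤ k ∧ k * k ≤ n ∧ PySem.Int.mod n k = 0) →
    fLoopBAux n fuel d = false := by
  intro fuel
  induction fuel with
  | zero =>
    intro d h2 hfuel h
    obtain ⟨k, hk1, hk2, -⟩ := h
    have hkk : k ≤ k * k := by nlinarith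
    omega
  | succ m ih =>
    intro d h2 hfuel h
    obtain ⟨k, hk1, hk2, hk3⟩ := h
    have hguard : d * d ≤ n := le_trans (mul_le_mul hk1 hk1 (by omega) (by omega)) hk2
    rw [fLoopBAux, if_pos hguard]
    by_cases hd : PySem.Int.mod n d = 0
    · rw [if_pos hd]
    · rw [if_neg hd]
      have hkd : k ≠ d := fun he => hd (he ▸ hk3)
      have hdn : d ≤ n := by nlinarith
      exact ih (d + 1) (by omega) (by omega) ⟨k, by omega, hk2, hk3⟩

lemma fLoopBAux_of_not_exists (n : Int) : ∀ (fuel : Nat) (d : Int),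
    (¬ ∃ k : Int, d ≤ k ∧ k * k ≤ n ∧ PySem.Int.mod n k = 0) →
    fLoopBAux n fuel d = y n := by
  intro fuel
  induction fuel with
  | zero => intro d _; rfl
  | succ m ih =>
    intro d h
    rw [fLoopBAux]
    split
    · rename_i hguard
      rw [if_neg (fun hc => h ⟨d, le_refl d, hguard, hc⟩)]
      exact ih (d + 1) (fun ⟨k, hk1, hk2, hk3⟩ => h ⟨k, by omega, hk2, hk3⟩)
    · rfl

-- for n ≥ 2 the two divisor searches succeed together
lemma exists_iff {n : Int} (hn : 2 ≤ n) :
    (∃ k : Int, 2 ≤ k ∧ k ≤ PySem.Int.floordiv n 2 ∧ PySem.Int.mod n k = 0) ↔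
    (∃ k : Int, 2 ≤ k ∧ k * k ≤ n ∧ PySem.Int.mod n k = 0) := by
  constructor
  · rintro ⟨k, h2k, hk2, hmod⟩
    have hdvd : k ∣ n := (PySem.Int.mod_eq_zero_iff_dvd n k).1 hmod
    have hk2' : k * 2 ≤ n := (PySem.Int.le_floordiv_iff_mul_le (by norm_num)).1 hk2
    obtain ⟨m, hm⟩ := hdvd
    by_cases hkk : k * k ≤ n
    · exact ⟨k, h2k, hkk, hmod⟩
    · have hkk' : n < k * k := lt_of_not_ge hkk
      have hm2 : 2 ≤ m := by nlinarith
      have hmm : m * m ≤ n := by nlinarith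
      exact ⟨m, hm2, hmm, (PySem.Int.mod_eq_zero_iff_dvd n m).2 ⟨k, by rw [hm]; ring⟩⟩
  · rintro ⟨k, h2k, hkk, hmod⟩
    have hdvd : k ∣ n := (PySem.Int.mod_eq_zero_iff_dvd n k).1 hmod
    obtain ⟨m, hm⟩ := hdvd
    have hkm : k ≤ m := by nlinarith
    refine ⟨k, h2k, (PySem.Int.le_floordiv_iff_mul_le (by norm_num)).2 (by nlinarith), hmod⟩

-- ===== VERDICT (by name: the statement is the Claim_ definition above) =====
theorem f_spec : Claim_equal_f := by
  intro n _
  show f n = f_alt n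
  by_cases h1 : n = 1
  · subst h1; rfl
  rcases lt_or_ge n 2 with hlt | hge
  · -- n ≤ 0 here (n ≠ 1): A's loop never runs, B's guard fires
    have hnz : ¬ ∃ k : Int, 2 ≤ k ∧ k ≤ PySem.Int.floordiv n 2 ∧ PySem.Int.mod n k = 0 := by
      rintro ⟨k, h2k, hk2, -⟩
      have h4 : 2 * 2 ≤ n := (PySem.Int.le_floordiv_iff_mul_le (by norm_num)).1 (le_trans h2k hk2)
      omega
    simp only [f, f_alt, if_neg h1, if_pos hlt, fLoopA,
      fLoopAAux_of_not_exists n _ 2 n hnz]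
    by_cases h0 : n = 0
    · simp [h0]
    · rw [if_neg h0]
      exact y_neg (by omega)
  · simp only [f, f_alt, if_neg h1, if_neg (show ¬ n < 2 by omega), fLoopA, fLoopB]
    by_cases hex : ∃ k : Int, 2 ≤ k ∧ k ≤ PySem.Int.floordiv n 2 ∧ PySem.Int.mod n k = 0
    · rw [fLoopAAux_of_exists n _ 2 n (le_refl _) hex, if_pos rfl,
        fLoopBAux_of_exists n _ 2 (le_refl _) (le_refl _) ((exists_iff hge).1 hex)]
    · rw [fLoopAAux_of_not_exists n _ 2 n hex, if_neg (by omega),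
        fLoopBAux_of_not_exists n _ 2 (fun h => hex ((exists_iff hge).2 h))]
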